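-- pv_equiv track=rewrite | github.com/blackholeinfiverse78-rgb/Parikshak-system | tests/test_bug_fixes.py | _make_signals
-- ===== SOURCE A (Python) =====
-- def _make_signals(paths):
--     return {
--         "components": {
--             "routes": [p for p in paths if 'api' in p or 'route' in p],
--             "services": [p for p in paths if 'service' in p],
--             "models": [p for p in paths if 'model' in p or 'schema' in p],
--             "tests": [p for p in paths if 'test' in p],
--             "docs": [p for p in paths if p.endswith('.md')]
--         }
--     }
-- ===== SOURCE B (Python) =====
-- def _make_signals(paths):
--     # table-driven: the buckets and their predicates are data, not code;
--     # one generic nested loop fills a dict of lists keyed by bucket name.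
--     spec = [
--         ("routes", lambda p: "api" in p or "route" in p),
--         ("services", lambda p: "service" in p),
--         ("models", lambda p: "model" in p or "schema" in p),
--         ("tests", lambda p: "test" in p),
--         ("docs", lambda p: p.endswith(".md")),
--     ]
--     buckets = {name: [] for name, _ in spec}
--     for p in paths:
--         for name, pred in spec:
--             if pred(p):
--                 buckets[name].append(p)
--     return {"components": buckets}
-- ===== Notes on version B (the rewrite author's own statement) =====
-- stated objective: alternative
-- what changed: A's five hard-coded per-bucket list comprehensions are replaced by a table-driven design: the buckets and predicates become a data table, an empty dict of lists is built from the table, and one generic nested loop (paths x table) appends each path to every bucket whose predicate it satisfies.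
import Mathlib
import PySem

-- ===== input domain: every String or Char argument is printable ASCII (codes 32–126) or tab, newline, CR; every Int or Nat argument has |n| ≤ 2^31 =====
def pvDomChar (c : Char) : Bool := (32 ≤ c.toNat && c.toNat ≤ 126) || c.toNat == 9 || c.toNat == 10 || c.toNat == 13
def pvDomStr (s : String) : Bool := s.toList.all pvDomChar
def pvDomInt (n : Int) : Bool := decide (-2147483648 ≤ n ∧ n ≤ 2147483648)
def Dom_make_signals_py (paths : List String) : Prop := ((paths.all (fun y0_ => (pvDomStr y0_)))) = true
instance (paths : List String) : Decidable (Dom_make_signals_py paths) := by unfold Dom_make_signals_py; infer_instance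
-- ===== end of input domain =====

-- B replaces A's five hard-coded per-bucket comprehensions by a table-driven design: a data
-- table of (bucket, predicate), a dict of lists built from it, and one generic nested loop
-- over paths × table filling the buckets (alternative decomposition, same cost class).

-- ===== PORT A =====
def make_signals_py (paths : List String) : List (String × List (String × List String)) :=
  [("components",
    [("routes", paths.filter (fun p => PySem.Str.isIn "api" p || PySem.Str.isIn "route" p)),
     ("services", paths.filter (fun p => PySem.Str.isIn "service" p)),
     ("models", paths.filter (fun p => PySem.Str.isIn "model" p || PySem.Str.isIn "schema" p)),
     ("tests", paths.filter (fun p => PySem.Str.isIn "test" p)),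
     ("docs", paths.filter (fun p => PySem.Str.endswith p ".md"))])]

-- ===== PORT B =====
-- Source B's spec table: buckets and their predicates as data
def msSpec : List (String × (String → Bool)) :=
  [("routes", fun p => PySem.Str.isIn "api" p || PySem.Str.isIn "route" p),
   ("services", fun p => PySem.Str.isIn "service" p),
   ("models", fun p => PySem.Str.isIn "model" p || PySem.Str.isIn "schema" p),
   ("tests", fun p => PySem.Str.isIn "test" p),
   ("docs", fun p => PySem.Str.endswith p ".md")]

def make_signals_py_alt (paths : List String) : List (String × List (String × List String)) :=
  -- buckets = {name: [] for name, _ in spec}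
  let buckets0 : PySem.Dict String (List String) :=
    msSpec.foldl (fun d nf => d.insert nf.1 []) PySem.Dict.empty
  -- for p in paths: for name, pred in spec: if pred(p): buckets[name].append(p)
  let buckets :=
    paths.foldl (fun d p =>
      msSpec.foldl (fun d nf => if nf.2 p then d.modify nf.1 [] (· ++ [p]) else d) d) buckets0
  [("components", buckets.items)]

-- ===== PRECONDITION & SPEC =====
def Spec_make_signals_py (paths : List String) (out : List (String × List (String × List String))) : Prop := out = make_signals_py_alt paths
instance (paths : List String) (out : List (String × List (String × List String))) : Decidable (Spec_make_signals_py paths out) := by unfold Spec_make_signals_py; infer_instance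

-- ===== CLAIM (what is proved, stated in full; the proofs are below) =====
def Claim_equal_make_signals_py : Prop := ∀ (paths : List String), Dom_make_signals_py paths → Spec_make_signals_py paths (make_signals_py paths)

-- ===== LEMMAS AND PROOFS =====
-- one step of B's inner table loop on the literal five-bucket dict state
set_option maxHeartbeats 1000000 in
theorem msStep (p : String) (r s m t d : List String) :
    msSpec.foldl (fun d nf => if nf.2 p then d.modify nf.1 [] (· ++ [p]) else d)
      (PySem.Dict.mk [("routes", r), ("services", s), ("models", m), ("tests", t), ("docs", d)]) =
    PySem.Dict.mk
      [("routes", if PySem.Str.isIn "api" p || PySem.Str.isIn "route" p then r ++ [p] else r),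
       ("services", if PySem.Str.isIn "service" p then s ++ [p] else s),
       ("models", if PySem.Str.isIn "model" p || PySem.Str.isIn "schema" p then m ++ [p] else m),
       ("tests", if PySem.Str.isIn "test" p then t ++ [p] else t),
       ("docs", if PySem.Str.endswith p ".md" then d ++ [p] else d)] := by
  simp only [msSpec, List.foldl_cons, List.foldl_nil]
  split_ifs <;>
    simp [PySem.Dict.modify, PySem.Dict.insert, PySem.Dict.getD, PySem.Dict.get?, PySem.Dict.contains]

-- invariant of B's path loop: it appends to each bucket exactly the paths its predicate accepts
theorem msLoop_eq (paths : List String) (r s m t d : List String) :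
    paths.foldl (fun d p =>
      msSpec.foldl (fun d nf => if nf.2 p then d.modify nf.1 [] (· ++ [p]) else d) d)
      (PySem.Dict.mk [("routes", r), ("services", s), ("models", m), ("tests", t), ("docs", d)]) =
    PySem.Dict.mk
      [("routes", r ++ paths.filter (fun p => PySem.Str.isIn "api" p || PySem.Str.isIn "route" p)),
       ("services", s ++ paths.filter (fun p => PySem.Str.isIn "service" p)),
       ("models", m ++ paths.filter (fun p => PySem.Str.isIn "model" p || PySem.Str.isIn "schema" p)),
       ("tests", t ++ paths.filter (fun p => PySem.Str.isIn "test" p)),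
       ("docs", d ++ paths.filter (fun p => PySem.Str.endswith p ".md"))] := by
  induction paths generalizing r s m t d with
  | nil => simp
  | cons p rest ih =>
    rw [List.foldl_cons, msStep, ih]
    simp only [List.filter_cons]
    split_ifs <;> simp

-- ===== VERDICT (by name: the statement is the Claim_ definition above) =====
theorem make_signals_py_spec : Claim_equal_make_signals_py := by
  intro paths _
  unfold Spec_make_signals_py make_signals_py make_signals_py_alt
  have h0 : msSpec.foldl (fun d nf => d.insert nf.1 []) (PySem.Dict.empty : PySem.Dict String (List String)) =
      PySem.Dict.mk [("routes", []), ("services", []), ("models", []), ("tests", []), ("docs", [])] := rfl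
  simp only [h0, msLoop_eq]
  rfl
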